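-- pv_equiv track=rewrite | github.com/caucasusuni/students | masalebi/maksim 6.py | count_names2
-- ===== SOURCE A (Python) =====
-- def count_names2(names):
--     myDict={}
--     for i in names:
--         if i in myDict:
--             myDict[i]+=1
--         else:
--             myDict[i]=1
--     return myDict
-- ===== SOURCE B (Python) =====
-- def count_names2(names):
--     # distinct names in first-appearance order, each counted by a rescan
--     return {name: names.count(name) for name in dict.fromkeys(names)}
-- ===== Notes on version B (the rewrite author's own statement) =====
-- stated objective: idiomatic
-- what changed: Replaces the incremental dict-tally loop by a one-line comprehension: dedup the names (dict.fromkeys, first-appearance order) and count each distinct name with list.count.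
import Mathlib
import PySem

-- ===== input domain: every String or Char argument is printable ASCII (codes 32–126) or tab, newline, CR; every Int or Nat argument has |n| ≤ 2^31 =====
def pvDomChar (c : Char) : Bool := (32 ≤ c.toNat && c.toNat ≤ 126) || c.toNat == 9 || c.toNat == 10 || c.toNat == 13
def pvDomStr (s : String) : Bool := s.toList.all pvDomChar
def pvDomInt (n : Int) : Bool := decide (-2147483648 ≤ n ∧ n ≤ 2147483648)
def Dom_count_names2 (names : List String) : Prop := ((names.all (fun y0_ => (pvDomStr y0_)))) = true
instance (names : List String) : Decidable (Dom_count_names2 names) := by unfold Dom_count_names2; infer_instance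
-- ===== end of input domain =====

-- B replaces A's incremental tally loop by dedup-then-count-per-distinct-name (idiomatic, not faster).

-- ===== PORT A =====
def count_names2 (names : List String) : List (String × Int) :=
  (names.foldl (fun d i =>
      if d.contains i then d.insert i (d.getD i 0 + 1) else d.insert i 1)
    PySem.Dict.empty).items

-- ===== PORT B =====
def count_names2_alt (names : List String) : List (String × Int) :=
  (PySem.List.dedup names).map (fun n => (n, (names.count n : Int)))

-- ===== PRECONDITION & SPEC =====
def Spec_count_names2 (names : List String) (out : List (String × Int)) : Prop := out = count_names2_alt names
instance (names : List String) (out : List (String × Int)) : Decidable (Spec_count_names2 names out) := by unfold Spec_count_names2; infer_instance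

-- ===== CLAIM (what is proved, stated in full; the proofs are below) =====
def Claim_equal_count_names2 : Prop := ∀ (names : List String), Dom_count_names2 names → Spec_count_names2 names (count_names2 names)

-- ===== LEMMAS AND PROOFS =====
-- A's loop body always equals 'insert i (getD i 0 + 1)' (when i is fresh, getD is 0).
theorem count_names2_foldl_eq (names : List String) :
    (names.foldl (fun d i =>
        if d.contains i then d.insert i (d.getD i 0 + 1) else d.insert i 1)
      PySem.Dict.empty)
    = PySem.Dict.counter names := by
  have hfun : (fun (d : PySem.Dict String Int) (i : String) =>
      if d.contains i then d.insert i (d.getD i 0 + 1) else d.insert i 1)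
      = (fun d i => d.insert i (d.getD i 0 + 1)) := by
    funext d i
    by_cases h : d.contains i = true
    · simp [h]
    · simp only [Bool.not_eq_true] at h
      rw [PySem.Dict.getD_of_not_contains (h := h)]
      simp [h]
  rw [hfun, PySem.Dict.foldl_insert_getD_add_one_eq_counter]

-- ===== VERDICT (by name: the statement is the Claim_ definition above) =====
theorem count_names2_spec : Claim_equal_count_names2 := by
  intro names _
  unfold Spec_count_names2 count_names2 count_names2_alt
  rw [count_names2_foldl_eq, PySem.Dict.items_counter]
  simp [PySem.List.dedup_eq_ofList]
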